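-- pv_equiv track=rewrite | github.com/akatsuyama/LigX | LigX/LigX_core.py | atomname_change_after_link_c_f
-- ===== SOURCE A (Python) =====
-- def atomname_change_after_link_c_f(atom_list,original_name_x,original_name_r):
--     if original_name_x != 'XC3g_1':
--         atom_list = ['C' if x == original_name_x else x for x in atom_list]
--     elif original_name_x == 'XC3g_1':
--         atom_list = ['XC3g_2' if x == original_name_x else x for x in atom_list]
--     for r in ['H','C','O','N','S','Cl','Br','I','P','F','D']:
--         R_name = 'R'+r+'_1'
--         if R_name == original_name_r:
--             atom_list = [r if x == original_name_r else x for x in atom_list]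
--     return atom_list
-- ===== SOURCE B (Python) =====
-- # Instead of scanning 11 candidate names with replacement passes, B inverts the
-- # name pattern once by slicing ('R<el>_1' -> el) and rewrites in a single loop.
-- ELEMENTS = ('H', 'C', 'O', 'N', 'S', 'Cl', 'Br', 'I', 'P', 'F', 'D')
--
--
-- def atomname_change_after_link_c_f(atom_list, original_name_x, original_name_r):
--     x_new = 'XC3g_2' if original_name_x == 'XC3g_1' else 'C'
--     core = original_name_r[1:-2]
--     r_active = core in ELEMENTS and original_name_r == 'R' + core + '_1'
--     out = []
--     for a in atom_list:
--         if a == original_name_x: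
--             out.append(x_new)
--         elif r_active and a == original_name_r:
--             out.append(core)
--         else:
--             out.append(a)
--     return out
-- ===== Notes on version B (the rewrite author's own statement) =====
-- stated objective: alternative
-- what changed: A scans 11 candidate names 'R<el>_1' running a whole-list replacement pass for each match (plus a prior pass for the x-name); B inverts the pattern once by slicing original_name_r[1:-2] and validating it against the element set, then rewrites the list in a single accumulator loop with no replacement passes and no candidate scan.
import Mathlib
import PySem

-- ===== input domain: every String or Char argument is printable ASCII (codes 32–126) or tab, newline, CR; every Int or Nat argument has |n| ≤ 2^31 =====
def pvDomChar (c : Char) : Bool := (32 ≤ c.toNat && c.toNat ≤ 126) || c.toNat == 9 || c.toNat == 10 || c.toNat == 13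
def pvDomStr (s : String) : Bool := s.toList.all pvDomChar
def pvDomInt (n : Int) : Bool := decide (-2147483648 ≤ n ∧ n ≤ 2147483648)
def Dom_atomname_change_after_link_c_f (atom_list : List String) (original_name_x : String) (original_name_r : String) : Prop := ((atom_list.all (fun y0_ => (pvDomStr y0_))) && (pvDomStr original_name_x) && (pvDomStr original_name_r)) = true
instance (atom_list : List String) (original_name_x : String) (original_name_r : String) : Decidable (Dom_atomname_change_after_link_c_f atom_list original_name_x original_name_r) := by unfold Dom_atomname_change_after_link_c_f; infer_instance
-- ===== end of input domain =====

-- B inverts the 'R<el>_1' name pattern once by slicing instead of scanning 11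
-- candidates with replacement passes, then rewrites in a single loop (objective: alternative).

-- the element list both Python sources write literally
def pvElems : List String := ["H", "C", "O", "N", "S", "Cl", "Br", "I", "P", "F", "D"]

-- ===== PORT A =====
def atomname_change_after_link_c_f (atom_list : List String) (original_name_x : String) (original_name_r : String) : List String :=
  let atom_list1 :=
    if original_name_x != "XC3g_1" then
      atom_list.map (fun x => if x == original_name_x then "C" else x)
    else if original_name_x == "XC3g_1" then
      atom_list.map (fun x => if x == original_name_x then "XC3g_2" else x)
    else atom_list
  pvElems.foldl
    (fun acc r =>
      let R_name := "R" ++ r ++ "_1"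
      if R_name == original_name_r then
        acc.map (fun x => if x == original_name_r then r else x)
      else acc)
    atom_list1

-- ===== PORT B =====
def atomname_change_after_link_c_f_alt (atom_list : List String) (original_name_x : String) (original_name_r : String) : List String :=
  let x_new := if original_name_x == "XC3g_1" then "XC3g_2" else "C"
  let core := PySem.Str.slice original_name_r (some 1) (some (-2))
  let r_active := pvElems.contains core && (original_name_r == "R" ++ core ++ "_1")
  atom_list.foldl
    (fun out a =>
      if a == original_name_x then out ++ [x_new]
      else if r_active && (a == original_name_r) then out ++ [core]
      else out ++ [a]) []

-- ===== PRECONDITION & SPEC =====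
def Spec_atomname_change_after_link_c_f (atom_list : List String) (original_name_x : String) (original_name_r : String) (out : List String) : Prop := out = atomname_change_after_link_c_f_alt atom_list original_name_x original_name_r
instance (atom_list : List String) (original_name_x : String) (original_name_r : String) (out : List String) : Decidable (Spec_atomname_change_after_link_c_f atom_list original_name_x original_name_r out) := by unfold Spec_atomname_change_after_link_c_f; infer_instance

-- ===== CLAIM (what is proved, stated in full; the proofs are below) =====
def Claim_equal_atomname_change_after_link_c_f : Prop := ∀ (atom_list : List String) (original_name_x : String) (original_name_r : String), Dom_atomname_change_after_link_c_f atom_list original_name_x original_name_r → Spec_atomname_change_after_link_c_f atom_list original_name_x original_name_r (atomname_change_after_link_c_f atom_list original_name_x original_name_r)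

-- ===== LEMMAS AND PROOFS =====

-- B's appending loop is the map of its per-element rule
theorem pvB_foldl_eq_map (nx nr x_new core : String) (r_active : Bool) (l acc : List String) :
    l.foldl
      (fun out a =>
        if a == nx then out ++ [x_new]
        else if r_active && (a == nr) then out ++ [core]
        else out ++ [a]) acc
    = acc ++ l.map (fun a =>
        if a == nx then x_new
        else if r_active && (a == nr) then core
        else a) := by
  have hstep : (fun (out : List String) a =>
      if a == nx then out ++ [x_new]
      else if r_active && (a == nr) then out ++ [core]
      else out ++ [a])
      = (fun (out : List String) a =>
          out ++ [if a == nx then x_new else if r_active && (a == nr) then core else a]) := by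
    funext out a; split_ifs <;> rfl
  rw [hstep]
  induction l generalizing acc with
  | nil => simp
  | cons a l ih => rw [List.foldl_cons, ih]; simp

-- A's r-loop of whole-list passes equals one map of the pointwise fold
theorem pvLoop_eq_map (nr : String) (es : List String) (l : List String) :
    List.foldl
      (fun acc r =>
        let R_name := "R" ++ r ++ "_1"
        if R_name == nr then acc.map (fun x => if x == nr then r else x) else acc)
      l es
    = l.map (fun x =>
        List.foldl (fun c r => if ("R" ++ r ++ "_1") == nr then (if c == nr then r else c) else c)
          x es) := by
  induction es generalizing l with
  | nil => simp
  | cons e es ih =>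
    simp only [List.foldl_cons]
    by_cases h : (("R" ++ e ++ "_1" : String) == nr) = true
    · simp only [h, if_true, ih, List.map_map]
      rfl
    · simp only [Bool.not_eq_true] at h
      simp only [h, Bool.false_eq_true, if_false, ih]

-- the pointwise fold fixes any value not beq to nr
theorem pvFold_fix_gen (nr v : String) (h : (v == nr) = false) (es : List String) :
    es.foldl
      (fun c r => if ("R" ++ r ++ "_1") == nr then (if c == nr then r else c) else c) v
    = v := by
  induction es with
  | nil => rfl
  | cons e es ih =>
    simp only [List.foldl_cons, h, Bool.false_eq_true, if_false, ite_self]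
    exact ih

theorem pvFold_fix (nr v : String) (h : (v == nr) = false) :
    pvElems.foldl
      (fun c r => if ("R" ++ r ++ "_1") == nr then (if c == nr then r else c) else c) v
    = v :=
  pvFold_fix_gen nr v h pvElems

-- when nr is not of the pattern for any element, B's r-rule is inactive
theorem pvActive_false (nr core : String)
    (h1 : nr ≠ "RH_1") (h2 : nr ≠ "RC_1") (h3 : nr ≠ "RO_1") (h4 : nr ≠ "RN_1")
    (h5 : nr ≠ "RS_1") (h6 : nr ≠ "RCl_1") (h7 : nr ≠ "RBr_1") (h8 : nr ≠ "RI_1")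
    (h9 : nr ≠ "RP_1") (h10 : nr ≠ "RF_1") (h11 : nr ≠ "RD_1") :
    (pvElems.contains core && (nr == "R" ++ core ++ "_1")) = false := by
  by_cases hc : core ∈ pvElems
  · have hne : (nr == "R" ++ core ++ "_1") = false := by
      simp [pvElems] at hc
      rcases hc with rfl|rfl|rfl|rfl|rfl|rfl|rfl|rfl|rfl|rfl|rfl <;> simp_all
    simp [hne]
  · have hcf : pvElems.contains core = false := by
      simpa using hc
    rw [hcf, Bool.false_and]

-- when nr matches no 'R<el>_1', A's fold is the identity even at nr
theorem pvFold_id (nr : String)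
    (h1 : nr ≠ "RH_1") (h2 : nr ≠ "RC_1") (h3 : nr ≠ "RO_1") (h4 : nr ≠ "RN_1")
    (h5 : nr ≠ "RS_1") (h6 : nr ≠ "RCl_1") (h7 : nr ≠ "RBr_1") (h8 : nr ≠ "RI_1")
    (h9 : nr ≠ "RP_1") (h10 : nr ≠ "RF_1") (h11 : nr ≠ "RD_1") (v : String) :
    pvElems.foldl
      (fun c r => if ("R" ++ r ++ "_1") == nr then (if c == nr then r else c) else c) v
    = v := by
  simp [pvElems, Ne.symm h1, Ne.symm h2, Ne.symm h3, Ne.symm h4, Ne.symm h5, Ne.symm h6,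
    Ne.symm h7, Ne.symm h8, Ne.symm h9, Ne.symm h10, Ne.symm h11]

-- at nr itself, A's pointwise fold computes exactly B's slice-based rule
theorem pvFold_at_r (nr : String) :
    pvElems.foldl
      (fun c r => if ("R" ++ r ++ "_1") == nr then (if c == nr then r else c) else c) nr
    = (if (pvElems.contains (PySem.Str.slice nr (some 1) (some (-2)))
            && (nr == "R" ++ (PySem.Str.slice nr (some 1) (some (-2))) ++ "_1")) = true
       then PySem.Str.slice nr (some 1) (some (-2)) else nr) := by
  by_cases h1 : nr = "RH_1"; · subst h1; decide
  by_cases h2 : nr = "RC_1"; · subst h2; decide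
  by_cases h3 : nr = "RO_1"; · subst h3; decide
  by_cases h4 : nr = "RN_1"; · subst h4; decide
  by_cases h5 : nr = "RS_1"; · subst h5; decide
  by_cases h6 : nr = "RCl_1"; · subst h6; decide
  by_cases h7 : nr = "RBr_1"; · subst h7; decide
  by_cases h8 : nr = "RI_1"; · subst h8; decide
  by_cases h9 : nr = "RP_1"; · subst h9; decide
  by_cases h10 : nr = "RF_1"; · subst h10; decide
  by_cases h11 : nr = "RD_1"; · subst h11; decide
  rw [pvActive_false nr _ h1 h2 h3 h4 h5 h6 h7 h8 h9 h10 h11, if_neg (by simp)]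
  exact pvFold_id nr h1 h2 h3 h4 h5 h6 h7 h8 h9 h10 h11 nr

-- pointwise: A's composed per-element transformation is B's per-element rule
theorem pvPointwise (nx nr x : String) :
    pvElems.foldl
      (fun c r => if ("R" ++ r ++ "_1") == nr then (if c == nr then r else c) else c)
      (if x == nx then (if nx == "XC3g_1" then "XC3g_2" else "C") else x)
    = (if x == nx then (if nx == "XC3g_1" then "XC3g_2" else "C")
       else if (pvElems.contains (PySem.Str.slice nr (some 1) (some (-2)))
                 && (nr == "R" ++ (PySem.Str.slice nr (some 1) (some (-2))) ++ "_1"))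
                && (x == nr)
       then PySem.Str.slice nr (some 1) (some (-2)) else x) := by
  by_cases hax : (x == nx) = true
  · simp only [hax, if_true]
    by_cases hX : (nx == "XC3g_1") = true
    · simp only [hX, if_true]
      by_cases hvn : (("XC3g_2" : String) == nr) = true
      · have : ("XC3g_2" : String) = nr := eq_of_beq hvn
        subst this; decide
      · exact pvFold_fix nr _ (by simpa using hvn)
    · simp only [Bool.not_eq_true] at hX
      simp only [hX]
      by_cases hvn : (("C" : String) == nr) = true
      · have : ("C" : String) = nr := eq_of_beq hvn
        subst this; decide
      · exact pvFold_fix nr _ (by simpa using hvn)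
  · simp only [Bool.not_eq_true] at hax
    simp only [hax, Bool.false_eq_true, if_false]
    by_cases hxr : (x == nr) = true
    · have hx : x = nr := eq_of_beq hxr
      subst hx
      simp only [beq_self_eq_true, Bool.and_true]
      exact pvFold_at_r x
    · simp only [Bool.not_eq_true] at hxr
      simp only [hxr, Bool.and_false, Bool.false_eq_true, if_false]
      exact pvFold_fix nr x hxr

-- ===== VERDICT (by name: the statement is the Claim_ definition above) =====
theorem atomname_change_after_link_c_f_spec : Claim_equal_atomname_change_after_link_c_f := by
  intro atom_list nx nr _
  show atomname_change_after_link_c_f atom_list nx nr = atomname_change_after_link_c_f_alt atom_list nx nr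
  unfold atomname_change_after_link_c_f atomname_change_after_link_c_f_alt
  rw [pvB_foldl_eq_map]
  simp only [List.nil_append]
  by_cases hX : (nx == "XC3g_1") = true
  · have hne : (nx != "XC3g_1") = false := by simp [bne, hX]
    simp only [hne, Bool.false_eq_true, if_false, hX, if_true]
    rw [pvLoop_eq_map, List.map_map]
    refine List.map_congr_left (fun x _ => ?_)
    simpa [Function.comp, hX] using pvPointwise nx nr x
  · have hne : (nx != "XC3g_1") = true := by simp [bne, hX]
    simp only [hne, if_true]
    have hX' : (nx == "XC3g_1") = false := by simpa using hX
    simp only [hX', Bool.false_eq_true, if_false]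
    rw [pvLoop_eq_map, List.map_map]
    refine List.map_congr_left (fun x _ => ?_)
    simpa [Function.comp, hX'] using pvPointwise nx nr x
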